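-- pv_equiv track=rewrite | github.com/yunting14/DSA | Sort_Algorithms/SortExercises.py | arrange_tickets
-- ===== SOURCE A (Python) =====
-- def arrange_tickets(tickets_list):
--     with_vacancies = ["T1","T2","T3","T4","T5","T6","T7","T8","T9","T10",
--                       "T11","T12","T13","T14","T15","T16","T17","T18","T19","T20"]
--     for i in range(20):
--         if with_vacancies[i] not in tickets_list:
--             with_vacancies[i] = "V"
--
--     group1 = with_vacancies[:10]
--     group2 = with_vacancies[10:]
--
--     for i in range(10):
--         if group1[i] == "V":
--             t_from_group2 = ""
--             for k in range(10):
--                 if group2[k] != "V":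
--                     t_from_group2 = group2[k]
--                     group2[k] = "V"
--                     break
--             group1[i] = t_from_group2
--         else:
--             continue
--
--     return group1
-- ===== SOURCE B (Python) =====
-- def arrange_tickets(tickets_list):
--     fillers = [f"T{j}" for j in range(11, 21) if f"T{j}" in tickets_list]
--
--     def slot(i):
--         # slot i keeps its own ticket if present; otherwise its rank among the
--         # missing first-ten slots picks the filler directly (no consumption state)
--         if f"T{i}" in tickets_list:
--             return f"T{i}"
--         r = sum(1 for k in range(1, i) if f"T{k}" not in tickets_list)
--         return fillers[r] if r < len(fillers) else ""
--
--     return [slot(i) for i in range(1, 11)]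
-- ===== Notes on version B (the rewrite author's own statement) =====
-- stated objective: alternative
-- what changed: Replaces A's stateful fill (mark tickets as 'V' in an array, then for each vacancy rescan-and-consume group2) with a stateless per-slot closed form: each slot is computed independently, a missing slot indexing the precomputed filler list directly by its rank = number of missing slots before it.
import Mathlib
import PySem

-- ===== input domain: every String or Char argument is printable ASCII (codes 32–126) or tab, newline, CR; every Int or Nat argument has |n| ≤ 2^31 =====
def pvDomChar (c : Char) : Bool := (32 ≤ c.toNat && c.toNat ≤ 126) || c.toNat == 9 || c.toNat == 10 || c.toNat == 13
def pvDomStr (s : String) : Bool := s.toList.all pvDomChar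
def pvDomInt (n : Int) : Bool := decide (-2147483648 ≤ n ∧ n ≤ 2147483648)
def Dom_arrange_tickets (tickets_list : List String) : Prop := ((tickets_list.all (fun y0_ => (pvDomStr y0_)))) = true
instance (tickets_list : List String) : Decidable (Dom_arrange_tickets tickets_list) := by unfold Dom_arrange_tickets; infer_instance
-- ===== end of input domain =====

-- B replaces A's stateful fill (mark as "V", rescan-and-consume group2 per vacancy) with a
-- stateless per-slot closed form: each missing slot indexes the filler list by its rank
-- (= number of missing slots before it) — an alternative algorithm, not claimed faster.

-- ===== PORT A =====
-- with_vacancies literal from A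
def pvWvInit : List String :=
  ["T1","T2","T3","T4","T5","T6","T7","T8","T9","T10",
   "T11","T12","T13","T14","T15","T16","T17","T18","T19","T20"]

-- A's inner 'for k in range(10): if group2[k] != "V": take it, mark slot "V", break'
-- as the obvious structural recursion over group2 (t_from_group2 starts as "").
def pvTakeFirst : List String → String × List String
  | [] => ("", [])
  | x :: xs =>
      if x ≠ "V" then (x, "V" :: xs)
      else
        let p := pvTakeFirst xs
        (p.1, x :: p.2)

-- A's outer 'for i in range(10)' rewriting group1 in place while mutating group2
def pvFillLoop : List String → List String → List String
  | [], _ => []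
  | x :: xs, g2 =>
      if x = "V" then
        let p := pvTakeFirst g2
        p.1 :: pvFillLoop xs p.2
      else x :: pvFillLoop xs g2

def arrange_tickets (tickets_list : List String) : List String :=
  -- 'for i in range(20): if with_vacancies[i] not in tickets_list: with_vacancies[i] = "V"'
  -- reads/writes only slot i: the obvious structural recursion is the elementwise map
  let with_vacancies := pvWvInit.map (fun t => if tickets_list.contains t then t else "V")
  let group1 := PySem.List.slice with_vacancies none (some 10)
  let group2 := PySem.List.slice with_vacancies (some 10) none
  pvFillLoop group1 group2

-- ===== PORT B =====
-- 'sum(1 for k in range(1, i) if f"T{k}" not in tickets_list)' — a 0/1-sum IS the count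
def pvRank (tickets_list : List String) (i : Int) : Nat :=
  (PySem.List.pyRange 1 i 1).countP
    (fun k => !tickets_list.contains ("T" ++ PySem.Int.toStr k))

-- the inner 'def slot(i)' of Source B
def pvSlot (tickets_list : List String) (fillers : List String) (i : Int) : String :=
  if tickets_list.contains ("T" ++ PySem.Int.toStr i) then "T" ++ PySem.Int.toStr i
  else
    let r := pvRank tickets_list i
    if r < fillers.length then fillers.getD r "" else ""

def arrange_tickets_alt (tickets_list : List String) : List String :=
  let fillers :=
    ((PySem.List.pyRange 11 21 1).filter
        (fun j => tickets_list.contains ("T" ++ PySem.Int.toStr j))).map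
      (fun j => "T" ++ PySem.Int.toStr j)
  (PySem.List.pyRange 1 11 1).map (pvSlot tickets_list fillers)

-- ===== PRECONDITION & SPEC =====
def Spec_arrange_tickets (tickets_list : List String) (out : List String) : Prop := out = arrange_tickets_alt tickets_list
instance (tickets_list : List String) (out : List String) : Decidable (Spec_arrange_tickets tickets_list out) := by unfold Spec_arrange_tickets; infer_instance

-- ===== CLAIM (what is proved, stated in full; the proofs are below) =====
def Claim_equal_arrange_tickets : Prop := ∀ (tickets_list : List String), Dom_arrange_tickets tickets_list → Spec_arrange_tickets tickets_list (arrange_tickets tickets_list)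

-- ===== LEMMAS AND PROOFS =====

theorem pvTk_ne_V (i : Int) : ("T" ++ PySem.Int.toStr i) ≠ "V" := by
  intro h
  have h2 := congrArg String.toList h
  simp [String.toList_append] at h2

-- proof-side model of A's outer loop carrying only the non-"V" elements of group2
def pvFill : List String → List String → List String
  | [], _ => []
  | x :: xs, fs =>
      if x = "V" then fs.headD "" :: pvFill xs fs.tail
      else x :: pvFill xs fs

theorem pvTakeFirst_fst (g2 : List String) :
    (pvTakeFirst g2).1 = ((g2.filter (fun x => x != "V")).headD "") := by
  induction g2 with
  | nil => rfl
  | cons x xs ih =>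
      by_cases h : x = "V" <;> simp [pvTakeFirst, h, ih]

theorem pvTakeFirst_snd (g2 : List String) :
    (pvTakeFirst g2).2.filter (fun x => x != "V") = (g2.filter (fun x => x != "V")).tail := by
  induction g2 with
  | nil => rfl
  | cons x xs ih =>
      by_cases h : x = "V" <;> simp [pvTakeFirst, h, ih]

theorem pvFillLoop_eq_pvFill (g1 g2 : List String) :
    pvFillLoop g1 g2 = pvFill g1 (g2.filter (fun x => x != "V")) := by
  induction g1 generalizing g2 with
  | nil => rfl
  | cons x xs ih =>
      by_cases h : x = "V" <;>
        simp [pvFillLoop, pvFill, h, ih, pvTakeFirst_fst, pvTakeFirst_snd]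

theorem pvFilter_mask (ts : List String) (l : List String) (h : ∀ x ∈ l, x ≠ "V") :
    ((l.map (fun t => if ts.contains t then t else "V")).filter (fun x => x != "V"))
      = l.filter (fun t => ts.contains t) := by
  induction l with
  | nil => rfl
  | cons x xs ih =>
      have hx := h x (by simp)
      have hrest : ∀ y ∈ xs, y ≠ "V" := fun y hy => h y (by simp [hy])
      by_cases hc : x ∈ ts <;>
        · simp [hc, hx]
          simpa using ih hrest

theorem pvHeadD_drop {α : Type} (l : List α) (k : Nat) (d : α) :
    (l.drop k).headD d = l.getD k d := by
  induction l generalizing k with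
  | nil => cases k <;> rfl
  | cons x xs ih => cases k with
      | zero => rfl
      | succ k => exact ih k

theorem pvRank_succ (ts : List String) (lo : Int) (h : 1 ≤ lo) :
    pvRank ts (lo + 1)
      = pvRank ts lo + (if ts.contains ("T" ++ PySem.Int.toStr lo) then 0 else 1) := by
  unfold pvRank
  rw [PySem.List.pyRange_one_succ_right h]
  by_cases hc : ("T" ++ PySem.Int.toStr lo) ∈ ts <;>
    simp [List.countP_append, hc]

theorem pvFill_rank (ts full : List String) :
    ∀ (n : Nat) (lo : Int), 1 ≤ lo →
    pvFill ((PySem.List.pyRange lo (lo + n) 1).map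
        (fun i => if ts.contains ("T" ++ PySem.Int.toStr i) then "T" ++ PySem.Int.toStr i else "V"))
      (full.drop (pvRank ts lo))
    = (PySem.List.pyRange lo (lo + n) 1).map (pvSlot ts full) := by
  intro n
  induction n with
  | zero =>
      intro lo _
      rw [PySem.List.pyRange_one_eq_nil (by simp)]
      rfl
  | succ n ih =>
      intro lo hlo
      have hcons : PySem.List.pyRange lo (lo + (n + 1 : Nat)) 1
          = lo :: PySem.List.pyRange (lo + 1) (lo + (n + 1 : Nat)) 1 :=
        PySem.List.pyRange_one_cons (by push_cast; omega)
      have hshift : lo + ((n + 1 : Nat) : Int) = (lo + 1) + (n : Nat) := by push_cast; omega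
      by_cases hc : ts.contains ("T" ++ PySem.Int.toStr lo) = true
      · have hc' : ("T" ++ PySem.Int.toStr lo) ∈ ts := by simpa using hc
        have hmask : (if ts.contains ("T" ++ PySem.Int.toStr lo) = true
              then "T" ++ PySem.Int.toStr lo else "V") = "T" ++ PySem.Int.toStr lo := by
          simp [hc']
        rw [hcons]
        simp only [List.map_cons, hmask, pvFill]
        rw [if_neg (pvTk_ne_V lo)]
        have hr : pvRank ts (lo + 1) = pvRank ts lo := by
          rw [pvRank_succ ts lo hlo, hc]; rfl
        refine congrArg₂ List.cons ?_ ?_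
        · simp [pvSlot, hc']
        · rw [hshift, ← hr]
          exact ih (lo + 1) (by omega)
      · have hc' : ("T" ++ PySem.Int.toStr lo) ∉ ts := by simpa using hc
        have hmask : (if ts.contains ("T" ++ PySem.Int.toStr lo) = true
              then "T" ++ PySem.Int.toStr lo else "V") = "V" := by
          simp [hc']
        rw [hcons]
        simp only [List.map_cons, hmask, pvFill, if_true]
        have hr : pvRank ts (lo + 1) = pvRank ts lo + 1 := by
          rw [pvRank_succ ts lo hlo, if_neg (by simpa using hc)]
        refine congrArg₂ List.cons ?_ ?_
        · rw [pvHeadD_drop]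
          have hslot : pvSlot ts full lo
              = if pvRank ts lo < full.length then full.getD (pvRank ts lo) "" else "" := by
            simp [pvSlot, hc']
          rw [hslot]
          by_cases hlen : pvRank ts lo < full.length
          · simp [hlen]
          · rw [if_neg hlen, List.getD_eq_default _ _ (by omega)]
        · rw [List.tail_drop, hshift, ← hr]
          exact ih (lo + 1) (by omega)

theorem arrange_tickets_spec' (ts : List String) :
    arrange_tickets ts = arrange_tickets_alt ts := by
  simp only [arrange_tickets, arrange_tickets_alt]
  have h1 : PySem.List.slice (pvWvInit.map (fun t => if ts.contains t then t else "V")) none (some 10)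
      = (pvWvInit.take 10).map (fun t => if ts.contains t then t else "V") := by
    rw [List.map_take]
    simpa using PySem.List.slice_to_natCast (pvWvInit.map (fun t => if ts.contains t then t else "V")) 10
  have h2 : PySem.List.slice (pvWvInit.map (fun t => if ts.contains t then t else "V")) (some 10) none
      = (pvWvInit.drop 10).map (fun t => if ts.contains t then t else "V") := by
    rw [List.map_drop]
    simpa using PySem.List.slice_from_natCast (pvWvInit.map (fun t => if ts.contains t then t else "V")) 10
  rw [h1, h2, pvFillLoop_eq_pvFill, pvFilter_mask ts _ (by decide)]
  have h3 : pvWvInit.take 10 = (PySem.List.pyRange 1 11 1).map (fun i => "T" ++ PySem.Int.toStr i) := by decide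
  have h4 : pvWvInit.drop 10 = (PySem.List.pyRange 11 21 1).map (fun i => "T" ++ PySem.Int.toStr i) := by decide
  rw [h3, h4, List.map_map, List.filter_map]
  simp only [Function.comp_def]
  have h5 : pvRank ts 1 = 0 := by
    unfold pvRank
    rw [PySem.List.pyRange_one_eq_nil (by norm_num)]
    rfl
  have h6 := pvFill_rank ts
    (((PySem.List.pyRange 11 21 1).filter
        (fun j => ts.contains ("T" ++ PySem.Int.toStr j))).map
      (fun j => "T" ++ PySem.Int.toStr j)) 10 1 (by norm_num)
  rw [h5] at h6
  simpa using h6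

-- ===== VERDICT (by name: the statement is the Claim_ definition above) =====
theorem arrange_tickets_spec : Claim_equal_arrange_tickets := by
  intro ts _
  exact arrange_tickets_spec' ts
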